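-- pv_equiv track=rewrite | github.com/shoji-pg-love/ELPy | Comparison.py | pairwise_best_match
-- ===== SOURCE A (Python) =====
-- from itertools import combinations
-- from typing import Dict, Iterable, List, Tuple
--
-- def incremental_overlap_detail(
--     left: List[Tuple[Tuple[str, ...], int]],
--     right: List[Tuple[Tuple[str, ...], int]],
--     step: int,
--     limit: int,
-- ) -> List[Tuple[int, int, List[Tuple[str, ...]]]]:
--     details = []
--     for start in range(0, limit, step):
--         l_slice = {ng for ng, _ in left[start : start + step]}
--         r_slice = {ng for ng, _ in right[start : start + step]}
--         shared = sorted(l_slice & r_slice)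
--         details.append((start, len(shared), shared))
--     return details
--
-- def pairwise_best_match(
--     ranked: Dict[str, List[Tuple[Tuple[str, ...], int]]], step: int, limit: int
-- ) -> Tuple[Tuple[str, str], int]:
--     best_pair, best_score = None, -1
--     for a, b in combinations(ranked.keys(), 2):
--         total = sum(
--             c
--             for _, c, _ in incremental_overlap_detail(ranked[a], ranked[b], step, limit)
--         )
--         if total > best_score:
--             best_pair, best_score = (a, b), total
--     return best_pair, best_score
-- ===== SOURCE B (Python) =====
-- from itertools import combinations
--
--
-- def pairwise_best_match(ranked, step, limit):
--     # Inverted-index aggregation: per window, group keys by shared ngram and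
--     # credit every pair in each group, instead of intersecting per pair.
--     keys = list(ranked)
--     if len(keys) < 2:
--         return None, -1
--     hits = []
--     for start in range(0, limit, step):
--         grams = []
--         for k in keys:
--             for ng, _ in ranked[k][start:start + step]:
--                 if ng not in grams:
--                     grams.append(ng)
--         for ng in grams:
--             bucket = [k for k in keys
--                       if any(ng == g for g, _ in ranked[k][start:start + step])]
--             for pair in combinations(bucket, 2):
--                 hits.append(pair)
--     best_pair, best_score = None, -1
--     for pair in combinations(keys, 2):
--         score = hits.count(pair)
--         if score > best_score:
--             best_pair, best_score = pair, score
--     return best_pair, best_score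
-- ===== Notes on version B (the rewrite author's own statement) =====
-- stated objective: alternative
-- what changed: A intersects the two keys' per-window ngram sets separately for every key pair; B instead builds, per window, an inverted index from each distinct ngram to the ordered bucket of keys whose window contains it, credits one hit to every key pair inside each bucket, and then selects the best pair by counting its hits, so no per-pair set intersection is ever computed.
import Mathlib
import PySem

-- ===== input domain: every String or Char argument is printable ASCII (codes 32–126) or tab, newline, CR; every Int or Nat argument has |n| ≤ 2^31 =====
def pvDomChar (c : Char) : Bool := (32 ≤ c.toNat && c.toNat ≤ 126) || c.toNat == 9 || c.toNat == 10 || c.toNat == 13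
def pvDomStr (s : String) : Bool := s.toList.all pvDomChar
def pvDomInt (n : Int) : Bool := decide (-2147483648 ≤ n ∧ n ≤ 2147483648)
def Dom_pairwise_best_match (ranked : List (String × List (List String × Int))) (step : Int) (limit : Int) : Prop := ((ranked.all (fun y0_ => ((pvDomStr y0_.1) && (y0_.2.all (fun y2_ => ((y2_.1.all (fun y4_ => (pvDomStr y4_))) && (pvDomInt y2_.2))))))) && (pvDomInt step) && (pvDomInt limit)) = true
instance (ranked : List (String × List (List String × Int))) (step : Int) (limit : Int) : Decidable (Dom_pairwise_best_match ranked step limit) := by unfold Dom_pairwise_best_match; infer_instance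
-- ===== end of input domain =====

-- B replaces A's per-pair window-set intersections by a per-window inverted index (ngram -> key
-- bucket) whose buckets are credited to every key pair; alternative algorithm, same exact result.

-- shared primitive: itertools.combinations(l, 2) in CPython order, as pairs
-- (the prelude's PySem.List.combinations yields lists; both ports unpack 2-combinations as pairs)
def pvPairs2 {α : Type} : List α → List (α × α)
  | [] => []
  | x :: xs => xs.map (fun y => (x, y)) ++ pvPairs2 xs

-- ===== PORT A =====
def incremental_overlap_detail (left right : List (List String × Int)) (step limit : Int) :
    List (Int × Int × List (List String)) :=
  (PySem.List.pyRange 0 limit step).foldl (fun details start =>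
    let l_slice := PySem.Set.ofList ((PySem.List.slice left (some start) (some (start + step))).map Prod.fst)
    let r_slice := PySem.Set.ofList ((PySem.List.slice right (some start) (some (start + step))).map Prod.fst)
    let shared := PySem.List.sorted (PySem.Set.inter l_slice r_slice) (fun x => x) false
    details ++ [(start, (shared.length : Int), shared)]) []

def pairwise_best_match (ranked : List (String × List (List String × Int))) (step : Int) (limit : Int) : (Option (String × String)) × Int :=
  (pvPairs2 (ranked.map Prod.fst)).foldl (fun best p =>
    let total := ((incremental_overlap_detail ((List.lookup p.1 ranked).getD [])
        ((List.lookup p.2 ranked).getD []) step limit).map (fun t => t.2.1)).sum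
    if total > best.2 then (some p, total) else best) (none, -1)

-- ===== PORT B =====
def pairwise_best_match_alt (ranked : List (String × List (List String × Int))) (step : Int) (limit : Int) : (Option (String × String)) × Int :=
  let keys := ranked.map Prod.fst
  if keys.length < 2 then (none, -1) else
  let hits : List (String × String) :=
    (PySem.List.pyRange 0 limit step).foldl (fun hits start =>
      let grams : List (List String) := keys.foldl (fun grams k =>
        (PySem.List.slice ((List.lookup k ranked).getD []) (some start) (some (start + step))).foldl
          (fun grams p => if p.1 ∈ grams then grams else grams ++ [p.1]) grams) []
      grams.foldl (fun hits ng =>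
        let bucket := keys.filter (fun k =>
          (PySem.List.slice ((List.lookup k ranked).getD []) (some start) (some (start + step))).any
            (fun p => ng == p.1))
        (pvPairs2 bucket).foldl (fun hits pair => hits ++ [pair]) hits) hits) []
  (pvPairs2 keys).foldl (fun best pair =>
    let score : Int := (hits.count pair : Int)
    if score > best.2 then (some pair, score) else best) (none, -1)

-- ===== PRECONDITION & SPEC =====
-- Pre_ excludes (i) step = 0 together with ≥ 2 keys, where Python's range(0, limit, 0) raises
-- ValueError, and (ii) association lists with duplicate keys, which do not encode a Python dict.
def Pre_pairwise_best_match (ranked : List (String × List (List String × Int))) (step : Int) (_limit : Int) : Prop :=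
  (ranked.map Prod.fst).Nodup ∧ (step ≠ 0 ∨ ranked.length < 2)
instance (ranked : List (String × List (List String × Int))) (step : Int) (limit : Int) : Decidable (Pre_pairwise_best_match ranked step limit) := by unfold Pre_pairwise_best_match; infer_instance

def pvWitness_pairwise_best_match : (List (String × List (List String × Int))) × Int × Int :=
  ([("a", [(["x"], 1), (["y"], 2)]), ("b", [(["x"], 3)])], 1, 2)

def Spec_pairwise_best_match (ranked : List (String × List (List String × Int))) (step : Int) (limit : Int) (out : (Option (String × String)) × Int) : Prop := out = pairwise_best_match_alt ranked step limit
instance (ranked : List (String × List (List String × Int))) (step : Int) (limit : Int) (out : (Option (String × String)) × Int) : Decidable (Spec_pairwise_best_match ranked step limit out) := by unfold Spec_pairwise_best_match; infer_instance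

-- ===== CLAIM (what is proved, stated in full; the proofs are below) =====
def Claim_equal_pairwise_best_match : Prop := ∀ (ranked : List (String × List (List String × Int))) (step : Int) (limit : Int), Dom_pairwise_best_match ranked step limit → Pre_pairwise_best_match ranked step limit → Spec_pairwise_best_match ranked step limit (pairwise_best_match ranked step limit)

-- ===== LEMMAS AND PROOFS =====

theorem pvPairs2_eq_nil_of_short {α : Type} (l : List α) (h : l.length < 2) : pvPairs2 l = [] := by
  match l with
  | [] => rfl
  | [x] => rfl
  | x :: y :: t => simp at h

theorem mem_pvPairs2 {α : Type} {l : List α} {a b : α} (h : (a, b) ∈ pvPairs2 l) : a ∈ l ∧ b ∈ l := by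
  induction l with
  | nil => simp [pvPairs2] at h
  | cons x xs ih =>
    simp only [pvPairs2, List.mem_append, List.mem_map] at h
    rcases h with ⟨y, hy, he⟩ | h
    · obtain ⟨rfl, rfl⟩ := Prod.mk.inj he
      exact ⟨List.mem_cons_self, List.mem_cons_of_mem _ hy⟩
    · exact ⟨List.mem_cons_of_mem _ (ih h).1, List.mem_cons_of_mem _ (ih h).2⟩

-- count of a fixed pair of a nodup list in the 2-combinations of a filtered sublist
theorem count_pvPairs2_filter {α : Type} [BEq α] [LawfulBEq α] (l : List α) (P : α → Bool) (a b : α)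
    (hnd : l.Nodup) (hm : (a, b) ∈ pvPairs2 l) :
    ((pvPairs2 (l.filter P)).count (a, b)) = (if P a ∧ P b then 1 else 0) := by
  induction l with
  | nil => simp [pvPairs2] at hm
  | cons x xs ih =>
    rw [List.nodup_cons] at hnd
    obtain ⟨hx, hxs⟩ := hnd
    simp only [pvPairs2, List.mem_append, List.mem_map] at hm
    rcases hm with ⟨y, hy, he⟩ | hm
    · obtain ⟨rfl, rfl⟩ := Prod.mk.inj he
      by_cases hPa : P x
      · rw [List.filter_cons_of_pos hPa]
        simp only [pvPairs2, List.count_append]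
        have h1 : ((xs.filter P).map (fun z => (x, z))).count (x, y) = (xs.filter P).count y :=
          List.count_map_of_injective _ _ (fun u v h => by exact (Prod.mk.inj h).2) _
        have h2 : (pvPairs2 (xs.filter P)).count (x, y) = 0 := by
          apply List.count_eq_zero_of_not_mem
          intro hmem
          exact hx (List.mem_of_mem_filter (mem_pvPairs2 hmem).1)
        rw [h1, h2]
        by_cases hPb : P y
        · rw [List.count_eq_one_of_mem (hxs.filter P) (List.mem_filter.mpr ⟨hy, hPb⟩)]
          simp [hPa, hPb]
        · rw [List.count_eq_zero_of_not_mem (fun hmem => hPb (List.of_mem_filter hmem))]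
          simp [hPb]
      · rw [List.filter_cons_of_neg hPa]
        rw [List.count_eq_zero_of_not_mem (fun hmem => hx (List.mem_of_mem_filter (mem_pvPairs2 hmem).1))]
        simp [hPa]
    · have ha := (mem_pvPairs2 hm).1
      have hax : a ≠ x := fun h => hx (h ▸ ha)
      by_cases hPx : P x
      · rw [List.filter_cons_of_pos hPx]
        simp only [pvPairs2, List.count_append]
        have h1 : ((xs.filter P).map (fun y => (x, y))).count (a, b) = 0 := by
          apply List.count_eq_zero_of_not_mem
          simp only [List.mem_map, not_exists]
          rintro y ⟨hy1, he1⟩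
          exact hax ((Prod.mk.inj he1).1).symm
        rw [h1, ih hxs hm]
        simp
      · rw [List.filter_cons_of_neg hPx]
        exact ih hxs hm

-- the 'if y not in g: g.append(y)' accumulator: membership and nodup
theorem mem_foldl_dedup {α : Type} [BEq α] [LawfulBEq α] (l g0 : List α) (x : α) :
    x ∈ l.foldl (fun g y => if y ∈ g then g else g ++ [y]) g0 ↔ x ∈ g0 ∨ x ∈ l := by
  induction l generalizing g0 with
  | nil => simp
  | cons y ys ih =>
    simp only [List.foldl_cons, ih]
    by_cases hy : y ∈ g0
    · simp only [hy, if_pos, List.mem_cons]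
      constructor
      · tauto
      · rintro (h | rfl | h) <;> tauto
    · simp only [hy, List.mem_cons, ite_false]
      constructor
      · rintro (h | h)
        · rcases List.mem_append.mp h with h | h
          · tauto
          · simp at h; tauto
        · tauto
      · rintro (h | rfl | h)
        · exact Or.inl (List.mem_append_left _ h)
        · exact Or.inl (List.mem_append_right _ (by simp))
        · tauto

theorem nodup_foldl_dedup {α : Type} [BEq α] [LawfulBEq α] (l g0 : List α) (h : g0.Nodup) :
    (l.foldl (fun g y => if y ∈ g then g else g ++ [y]) g0).Nodup := by
  induction l generalizing g0 with
  | nil => simpa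
  | cons y ys ih =>
    simp only [List.foldl_cons]
    by_cases hy : y ∈ g0
    · simpa [hy] using ih g0 h
    · simp only [hy, ite_false]
      refine ih _ (List.Nodup.append h (List.nodup_singleton y) ?_)
      intro a ha hb
      simp only [List.mem_singleton] at hb
      subst hb
      exact hy ha

theorem count_flatMap_eq_sum {α β : Type} [BEq β] [LawfulBEq β] (l : List α) (w : α → List β) (p : β) :
    (l.flatMap w).count p = (l.map (fun x => (w x).count p)).sum := by
  induction l with
  | nil => simp
  | cons x xs ih => simp [List.flatMap_cons, List.count_append, ih]

theorem mem_foldl_dedup_nested {α β : Type} [BEq β] [LawfulBEq β] (keys : List α) (sl : α → List β) (g0 : List β) (x : β) :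
    x ∈ keys.foldl (fun g k => (sl k).foldl (fun g y => if y ∈ g then g else g ++ [y]) g) g0 ↔
      x ∈ g0 ∨ ∃ k ∈ keys, x ∈ sl k := by
  induction keys generalizing g0 with
  | nil => simp
  | cons k ks ih =>
    simp only [List.foldl_cons, ih, mem_foldl_dedup]
    constructor
    · rintro ((h | h) | ⟨k', hk', h⟩)
      · exact Or.inl h
      · exact Or.inr ⟨k, List.mem_cons_self, h⟩
      · exact Or.inr ⟨k', List.mem_cons_of_mem _ hk', h⟩
    · rintro (h | ⟨k', hk', h⟩)
      · exact Or.inl (Or.inl h)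
      · rcases List.mem_cons.mp hk' with rfl | hk'
        · exact Or.inl (Or.inr h)
        · exact Or.inr ⟨k', hk', h⟩

theorem nodup_foldl_dedup_nested {α β : Type} [BEq β] [LawfulBEq β] (keys : List α) (sl : α → List β) (g0 : List β) (h : g0.Nodup) :
    (keys.foldl (fun g k => (sl k).foldl (fun g y => if y ∈ g then g else g ++ [y]) g) g0).Nodup := by
  induction keys generalizing g0 with
  | nil => simpa
  | cons k ks ih => exact ih _ (nodup_foldl_dedup _ _ h)

theorem sum_map_ite_one {β : Type} (l : List β) (Q : β → Prop) [DecidablePred Q] :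
    (l.map (fun x => if Q x then (1 : Nat) else 0)).sum = (l.filter (fun x => decide (Q x))).length := by
  induction l with
  | nil => rfl
  | cons x xs ih =>
    by_cases h : Q x <;> simp [h, ih, Nat.add_comm]

-- one window of B's inverted index: total pair credit = size of the two keys' ngram intersection
theorem window_sum {β : Type} [BEq β] [LawfulBEq β]
    (keys : List String) (sl : String → List β)
    (hnd : keys.Nodup) (a b : String) (hm : (a, b) ∈ pvPairs2 keys) :
    ((keys.foldl (fun g k => (sl k).foldl (fun g y => if y ∈ g then g else g ++ [y]) g) []).flatMap
      (fun ng => pvPairs2 (keys.filter (fun k => decide (ng ∈ sl k))))).count (a, b)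
    = (PySem.Set.inter (PySem.Set.ofList (sl a)) (PySem.Set.ofList (sl b))).length := by
  rw [count_flatMap_eq_sum]
  have hcong : ∀ ng ∈ (keys.foldl (fun g k => (sl k).foldl (fun g y => if y ∈ g then g else g ++ [y]) g) []),
      (pvPairs2 (keys.filter (fun k => decide (ng ∈ sl k)))).count (a, b)
        = (if ng ∈ sl a ∧ ng ∈ sl b then (1 : Nat) else 0) := by
    intro ng _
    rw [count_pvPairs2_filter _ _ _ _ hnd hm]
    simp
  rw [List.map_congr_left hcong, sum_map_ite_one]
  have ha : a ∈ keys := (mem_pvPairs2 hm).1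
  have h1 : ((keys.foldl (fun g k => (sl k).foldl (fun g y => if y ∈ g then g else g ++ [y]) g) []).filter
      (fun x => decide (x ∈ sl a ∧ x ∈ sl b))).Perm
      (PySem.Set.inter (PySem.Set.ofList (sl a)) (PySem.Set.ofList (sl b))) := by
    apply (List.perm_ext_iff_of_nodup ((nodup_foldl_dedup_nested keys sl [] List.nodup_nil).filter _)
      ((PySem.Set.nodup_ofList (sl a)).filter _)).mpr
    intro x
    rw [List.mem_filter, mem_foldl_dedup_nested, decide_eq_true_eq,
      show (List.filter (fun x => (PySem.Set.ofList (sl b)).contains x) (PySem.Set.ofList (sl a)))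
        = ((PySem.Set.ofList (sl a)).inter (PySem.Set.ofList (sl b))) from rfl,
      PySem.Set.mem_inter, PySem.Set.mem_ofList, PySem.Set.mem_ofList]
    constructor
    · rintro ⟨_, h1, h2⟩; exact ⟨h1, h2⟩
    · rintro ⟨h1, h2⟩; exact ⟨Or.inr ⟨a, ha, h1⟩, h1, h2⟩
  exact h1.length_eq

-- window_sum, phrased on the (ngram, count) pair lists the ports actually slice
theorem window_sum' {β : Type} [BEq β] [LawfulBEq β]
    (keys : List String) (slp : String → List (β × Int))
    (hnd : keys.Nodup) (a b : String) (hm : (a, b) ∈ pvPairs2 keys) :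
    ((keys.foldl (fun g k => (slp k).foldl (fun g p => if p.1 ∈ g then g else g ++ [p.1]) g) []).flatMap
      (fun ng => pvPairs2 (keys.filter (fun k => (slp k).any (fun p => ng == p.1))))).count (a, b)
    = (PySem.Set.inter (PySem.Set.ofList ((slp a).map Prod.fst)) (PySem.Set.ofList ((slp b).map Prod.fst))).length := by
  have hfold : ∀ (l : List (β × Int)) (g : List β),
      l.foldl (fun g p => if p.1 ∈ g then g else g ++ [p.1]) g
        = (l.map Prod.fst).foldl (fun g y => if y ∈ g then g else g ++ [y]) g := by
    intro l g; rw [List.foldl_map]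
  have hany : ∀ (l : List (β × Int)) (ng : β),
      (l.any (fun p => ng == p.1)) = decide (ng ∈ l.map Prod.fst) := by
    intro l ng
    by_cases h : ng ∈ l.map Prod.fst
    · obtain ⟨q, hq, hf⟩ := List.mem_map.mp h
      simp only [h, decide_true]
      exact List.any_eq_true.mpr ⟨q, hq, by simp [hf]⟩
    · simp only [h, decide_false]
      rw [List.any_eq_false]
      intro q hq hb
      exact h (List.mem_map.mpr ⟨q, hq, (eq_of_beq hb).symm⟩)
  simp only [hfold, hany]
  exact window_sum keys (fun k => (slp k).map Prod.fst) hnd a b hm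

-- ===== VERDICT (by name: the statement is the Claim_ definition above) =====
theorem pairwise_best_match_spec : Claim_equal_pairwise_best_match := by
  intro ranked step limit _ hpre
  obtain ⟨hnd, _⟩ := hpre
  unfold Spec_pairwise_best_match
  simp only [pairwise_best_match, pairwise_best_match_alt]
  by_cases hk : (ranked.map Prod.fst).length < 2
  · rw [if_pos hk, pvPairs2_eq_nil_of_short _ hk]
    rfl
  · rw [if_neg hk]
    apply PySem.List.foldl_congr_mem
    intro acc p hp
    obtain ⟨a, b⟩ := p
    have hEq : ((incremental_overlap_detail ((List.lookup a ranked).getD [])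
        ((List.lookup b ranked).getD []) step limit).map (fun t => t.2.1)).sum
        = (((PySem.List.pyRange 0 limit step).foldl (fun hits start =>
            ((ranked.map Prod.fst).foldl (fun grams k =>
              (PySem.List.slice ((List.lookup k ranked).getD []) (some start) (some (start + step))).foldl
                (fun grams p => if p.1 ∈ grams then grams else grams ++ [p.1]) grams) []).foldl
              (fun hits ng =>
                (pvPairs2 ((ranked.map Prod.fst).filter (fun k =>
                  (PySem.List.slice ((List.lookup k ranked).getD []) (some start) (some (start + step))).any
                    (fun p => ng == p.1)))).foldl (fun hits pair => hits ++ [pair]) hits) hits) []).count (a, b) : Int) := by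
      simp only [PySem.List.foldl_append_singleton, PySem.List.foldl_append_eq_flatMap, List.nil_append]
      rw [count_flatMap_eq_sum]
      simp only [incremental_overlap_detail, PySem.List.foldl_append_singleton_eq_map, List.nil_append,
        List.map_map]
      have hwin : ∀ start ∈ PySem.List.pyRange 0 limit step,
          (((ranked.map Prod.fst).foldl (fun g k =>
              (PySem.List.slice ((List.lookup k ranked).getD []) (some start) (some (start + step))).foldl
                (fun g p => if p.1 ∈ g then g else g ++ [p.1]) g) []).flatMap
            (fun ng => pvPairs2 ((ranked.map Prod.fst).filter (fun k =>
              (PySem.List.slice ((List.lookup k ranked).getD []) (some start) (some (start + step))).any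
                (fun p => ng == p.1))))).count (a, b)
          = (PySem.Set.inter
              (PySem.Set.ofList ((PySem.List.slice ((List.lookup a ranked).getD []) (some start) (some (start + step))).map Prod.fst))
              (PySem.Set.ofList ((PySem.List.slice ((List.lookup b ranked).getD []) (some start) (some (start + step))).map Prod.fst))).length := by
        intro start _
        exact window_sum' (ranked.map Prod.fst)
          (fun k => PySem.List.slice ((List.lookup k ranked).getD []) (some start) (some (start + step)))
          hnd a b hp
      rw [List.map_congr_left hwin]
      rw [Nat.cast_list_sum]
      simp [List.map_map]
      rfl
    rw [hEq]
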